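-- pv_equiv track=rewrite | github.com/sharpenedkey/mlpcd-assignment-1 | src/cells_calculator.py | compute_objects
-- ===== SOURCE A (Python) =====
-- def compute_objects(cells, n_cells, dim):
--     # Initialize the dictionary to store the number of cells covering each number of objects
--     objects = {}
--
--     # Loop over the cells
--     for cell in cells:
--         # Get the number of objects in the cell
--         n_objects = cells[cell]
--
--         # Loop over the range from 1 to n_objects
--         for i in range(1, n_objects + 1):
--             # If i is not in the dictionary, add it
--             if i not in objects:
--                 objects[i] = 1
--             # Otherwise, increment the count
--             else:
--                 objects[i] += 1
--
--     # Now compute the amount of cells covering 0 objects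
--     # There is a total of n_cells ** dim cells in the space
--     # The number of cells covering 0 objects is the difference between the total number of cells and the number of cells covering at least 1 object
--     objects[0] = n_cells ** dim - objects[1]
--
--     return objects
-- ===== SOURCE B (Python) =====
-- def compute_objects(cells, n_cells, dim):
--     # Count, for each i >= 1 up to the largest cell load, how many cells carry >= i objects,
--     # then prepend-compute the 0 entry from the total cell count.
--     values = list(cells.values())
--     m = max(values, default=0)
--     objects = {i: sum(1 for v in values if v >= i) for i in range(1, m + 1)}
--     objects[0] = n_cells ** dim - objects[1]
--     return objects
-- ===== Notes on version B (the rewrite author's own statement) =====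
-- stated objective: alternative
-- what changed: B replaces A's per-cell loop that increments a dict counter for every i from 1 to each cell's object count by a direct per-threshold construction: it takes the maximum object count m and builds {i: number of cells with at least i objects} for i = 1..m by counting, with no dict mutation during the scan.
-- outside the precondition, e.g. on compute_objects({1: 1}, 2, -1): A returns {1: 1, 0: -0.5}, B returns {1: 1, 0: -0.5}
import Mathlib
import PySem

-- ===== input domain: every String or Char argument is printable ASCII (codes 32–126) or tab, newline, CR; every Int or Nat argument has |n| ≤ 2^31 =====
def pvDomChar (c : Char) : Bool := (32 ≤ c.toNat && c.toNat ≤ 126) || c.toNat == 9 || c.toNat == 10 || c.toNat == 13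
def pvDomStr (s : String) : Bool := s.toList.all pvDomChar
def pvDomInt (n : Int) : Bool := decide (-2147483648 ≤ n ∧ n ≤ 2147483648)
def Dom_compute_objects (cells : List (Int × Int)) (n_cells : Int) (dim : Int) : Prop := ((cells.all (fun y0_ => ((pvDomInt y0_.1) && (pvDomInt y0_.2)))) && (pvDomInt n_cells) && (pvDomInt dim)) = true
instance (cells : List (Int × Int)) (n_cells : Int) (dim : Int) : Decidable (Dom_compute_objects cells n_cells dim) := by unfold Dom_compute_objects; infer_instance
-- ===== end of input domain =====

-- B rebuilds the histogram per threshold (count of cells with at least i objects, i = 1..max)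
-- instead of A's per-cell counter increments: an alternative algorithm, not claimed faster.

-- ===== PORT A =====
def compute_objects (cells : List (Int × Int)) (n_cells : Int) (dim : Int) : List (Int × Int) :=
  -- the dict argument itself, for the lookups cells[cell] (lookup = first match)
  let cellsD : PySem.Dict Int Int := PySem.Dict.mk cells
  -- objects = {}; for cell in cells: n_objects = cells[cell]; for i in range(1, n_objects+1): ...
  let objects : PySem.Dict Int Int :=
    cells.foldl (fun objects cell =>
      let n_objects := cellsD.getD cell.1 0  -- cells[cell]: the key comes from the iteration, so it is present
      (PySem.List.pyRange 1 (n_objects + 1) 1).foldl (fun objects i =>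
        if objects.contains i = false then objects.insert i 1
        else objects.insert i (objects.getD i 0 + 1)) objects) PySem.Dict.empty
  -- objects[0] = n_cells ** dim - objects[1]; dim < 0 (float result) and a missing key 1 (KeyError)
  -- are excluded by Pre_, so '^ dim.toNat' and 'getD 1 0' are exact on the admitted inputs
  let objects := objects.insert 0 (n_cells ^ dim.toNat - objects.getD 1 0)
  objects.items

-- ===== PORT B =====
def compute_objects_alt (cells : List (Int × Int)) (n_cells : Int) (dim : Int) : List (Int × Int) :=
  let values := (PySem.Dict.mk cells).values          -- list(cells.values())
  let m := PySem.List.maxD values (fun v => v) 0      -- max(values, default=0)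
  -- {i: sum(1 for v in values if v >= i) for i in range(1, m + 1)}
  let objects : PySem.Dict Int Int :=
    (PySem.List.pyRange 1 (m + 1) 1).foldl
      (fun d i => d.insert i ((List.map (fun _ => (1 : Int)) (values.filter (fun v => i ≤ v))).sum))
      PySem.Dict.empty
  -- objects[0] = n_cells ** dim - objects[1]; same remark as in the port of A
  let objects := objects.insert 0 (n_cells ^ dim.toNat - objects.getD 1 0)
  objects.items

-- ===== PRECONDITION & SPEC =====
-- Pre_ excludes: lists with duplicate keys (the Python argument is a dict, which cannot hold them);
-- dim < 0, where n_cells ** dim is a float (or ZeroDivisionError), not an int; and inputs whose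
-- values are all ≤ 0, where A raises KeyError on objects[1] (B raises the same KeyError).
def Pre_compute_objects (cells : List (Int × Int)) (n_cells : Int) (dim : Int) : Prop :=
  (cells.map Prod.fst).Nodup ∧ 0 ≤ dim ∧ ∃ p ∈ cells, 0 < p.2
instance (cells : List (Int × Int)) (n_cells : Int) (dim : Int) : Decidable (Pre_compute_objects cells n_cells dim) := by unfold Pre_compute_objects; infer_instance

def pvWitness_compute_objects : (List (Int × Int)) × Int × Int := ([(0, 2), (5, 1)], 3, 2)

def Spec_compute_objects (cells : List (Int × Int)) (n_cells : Int) (dim : Int) (out : List (Int × Int)) : Prop := out = compute_objects_alt cells n_cells dim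
instance (cells : List (Int × Int)) (n_cells : Int) (dim : Int) (out : List (Int × Int)) : Decidable (Spec_compute_objects cells n_cells dim out) := by unfold Spec_compute_objects; infer_instance

-- ===== CLAIM (what is proved, stated in full; the proofs are below) =====
def Claim_equal_compute_objects : Prop := ∀ (cells : List (Int × Int)) (n_cells : Int) (dim : Int), Dom_compute_objects cells n_cells dim → Pre_compute_objects cells n_cells dim → Spec_compute_objects cells n_cells dim (compute_objects cells n_cells dim)

-- ===== LEMMAS AND PROOFS =====

-- A's inner-loop body is an unconditional counting insert.
theorem pv_step_eq :
    (fun (d : PySem.Dict Int Int) (i : Int) =>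
      if d.contains i = false then d.insert i 1 else d.insert i (d.getD i 0 + 1))
    = fun (d : PySem.Dict Int Int) (i : Int) => d.insert i (d.getD i 0 + 1) := by
  funext d i
  by_cases h : d.contains i = false
  · simp [h, PySem.Dict.getD_of_not_contains d 0 h]
  · simp [h]

-- max(values, default=0) is foldl max 0 as soon as some value is positive.
theorem pv_foldl_max_shift (vs : List Int) (a b : Int) :
    vs.foldl max (max a b) = max a (vs.foldl max b) := by
  induction vs generalizing b with
  | nil => rfl
  | cons v rest ih =>
    simp only [List.foldl_cons]
    rw [max_assoc, ih]

theorem pv_maxD_eq (vs : List Int) (h : ∃ v ∈ vs, 0 < v) :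
    PySem.List.maxD vs (fun v => v) 0 = vs.foldl max 0 := by
  obtain ⟨v0, hv0, hpos⟩ := h
  cases vs with
  | nil => simp at hv0
  | cons w rest =>
    rw [PySem.List.maxD_id_cons]
    have : (w :: rest).foldl max 0 = rest.foldl max (max 0 w) := by simp
    rw [this, pv_foldl_max_shift]
    have hw : w ≤ rest.foldl max w := (PySem.List.le_foldl_max rest w).1
    have hv0' : v0 ≤ rest.foldl max w := by
      rcases List.mem_cons.1 hv0 with h' | h'
      · omega
      · exact (PySem.List.le_foldl_max rest w).2 v0 h'
    omega

-- distinct elements of the concatenated ranges 1..v, in first-occurrence order, are 1..max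
theorem pv_ofList_flat (vs : List Int) :
    PySem.Set.ofList (vs.flatMap (fun v => PySem.List.pyRange 1 (v + 1) 1))
      = PySem.List.pyRange 1 (vs.foldl max 0 + 1) 1 := by
  induction vs using List.reverseRecOn with
  | nil => rfl
  | append_singleton vs v ih =>
    have hM : 0 ≤ vs.foldl max 0 := (PySem.List.le_foldl_max vs 0).1
    set M := vs.foldl max 0 with hMdef
    have hfold : (vs ++ [v]).foldl max 0 = max M v := by simp [hMdef]
    rw [List.flatMap_append, PySem.Set.ofList_append, ih, hfold]
    simp only [List.flatMap_cons, List.flatMap_nil, List.append_nil]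
    rw [PySem.Set.update_eq_append_filter,
        PySem.Set.ofList_eq_self_of_nodup _ (PySem.List.nodup_pyRange_one 1 (v + 1))]
    by_cases hv : v ≤ M
    · have hmax : max M v = M := by omega
      have hnil : (PySem.List.pyRange 1 (v + 1) 1).filter
          (fun y => !(PySem.Set.contains (PySem.List.pyRange 1 (M + 1) 1) y)) = [] := by
        rw [List.filter_eq_nil_iff]
        intro y hy
        have hy' := PySem.List.mem_pyRange_one.1 hy
        have : y ∈ PySem.List.pyRange 1 (M + 1) 1 := PySem.List.mem_pyRange_one.2 (by omega)
        simp [PySem.Set.contains_eq_listContains, this]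
      rw [hnil, hmax, List.append_nil]
    · have hmax : max M v = v := by omega
      rw [PySem.List.pyRange_one_append 1 (M + 1) (v + 1) (by omega) (by omega),
          List.filter_append]
      have h1 : (PySem.List.pyRange 1 (M + 1) 1).filter
          (fun y => !(PySem.Set.contains (PySem.List.pyRange 1 (M + 1) 1) y)) = [] := by
        rw [List.filter_eq_nil_iff]
        intro y hy
        simp [PySem.Set.contains_eq_listContains, hy]
      have h2 : (PySem.List.pyRange (M + 1) (v + 1) 1).filter
          (fun y => !(PySem.Set.contains (PySem.List.pyRange 1 (M + 1) 1) y)) =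
          PySem.List.pyRange (M + 1) (v + 1) 1 := by
        rw [List.filter_eq_self]
        intro y hy
        have hy' := PySem.List.mem_pyRange_one.1 hy
        have : y ∉ PySem.List.pyRange 1 (M + 1) 1 := by
          intro hc; have := PySem.List.mem_pyRange_one.1 hc; omega
        simp [PySem.Set.contains_eq_listContains, this]
      rw [h1, h2, List.nil_append, hmax,
          ← PySem.List.pyRange_one_append 1 (M + 1) (v + 1) (by omega) (by omega)]

-- multiplicity of i ≥ 1 in the concatenated ranges = number of values ≥ i
theorem pv_count_flat (vs : List Int) (i : Int) (hi : 1 ≤ i) :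
    (vs.flatMap (fun v => PySem.List.pyRange 1 (v + 1) 1)).count i
      = vs.countP (fun v => i ≤ v) := by
  induction vs with
  | nil => rfl
  | cons v rest ih =>
    rw [List.flatMap_cons, List.count_append, ih, List.countP_cons]
    have hone : (PySem.List.pyRange 1 (v + 1) 1).count i = if i ≤ v then 1 else 0 := by
      by_cases hv : i ≤ v
      · rw [if_pos hv]
        exact List.count_eq_one_of_mem (PySem.List.nodup_pyRange_one 1 (v + 1))
          (PySem.List.mem_pyRange_one.2 (by omega))
      · rw [if_neg hv]
        exact List.count_eq_zero_of_not_mem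
          (fun hc => hv (by have := PySem.List.mem_pyRange_one.1 hc; omega))
    rw [hone]
    by_cases hv : i ≤ v
    · simp [hv]; omega
    · simp [hv]

-- items of B's comprehension fold
theorem pv_items_B (m : Int) (S : Int → Int) :
    ((PySem.List.pyRange 1 (m + 1) 1).foldl (fun d i => d.insert i (S i))
      (PySem.Dict.empty : PySem.Dict Int Int)).items
    = (PySem.List.pyRange 1 (m + 1) 1).map (fun i => (i, S i)) := by
  have h := PySem.Dict.items_foldl_insert_fresh (PySem.List.pyRange 1 (m + 1) 1)
    (fun i => i) S (PySem.Dict.empty : PySem.Dict Int Int)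
    (fun a _ => by simp [PySem.Dict.contains_empty])
    (by simpa using PySem.List.nodup_pyRange_one 1 (m + 1))
  simpa using h

-- ===== VERDICT (by name: the statement is the Claim_ definition above) =====
theorem compute_objects_spec : Claim_equal_compute_objects := by
  intro cells n_cells dim hdom hpre
  obtain ⟨hnd, hdim, p, hp, hppos⟩ := hpre
  unfold Spec_compute_objects compute_objects compute_objects_alt
  simp only []
  rw [pv_step_eq, ← List.foldl_flatMap]
  have hvals : (PySem.Dict.mk cells).values = cells.map Prod.snd := rfl
  have hgetD : ∀ c ∈ cells, (PySem.Dict.mk cells).getD c.1 0 = c.2 := by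
    intro c hc
    exact PySem.Dict.getD_of_mem_items (PySem.Dict.mk cells)
      (by simpa [Prod.mk.eta] using hc) (by simpa using hnd) 0
  have hg : cells.flatMap (fun cell => PySem.List.pyRange 1 ((PySem.Dict.mk cells).getD cell.1 0 + 1) 1)
      = (cells.map Prod.snd).flatMap (fun v => PySem.List.pyRange 1 (v + 1) 1) := by
    rw [List.flatMap_map]
    exact List.flatMap_congr (fun c hc => by rw [hgetD c hc])
  rw [hg, PySem.Dict.foldl_insert_getD_add_one_eq_counter, hvals]
  have hm : PySem.List.maxD (cells.map Prod.snd) (fun v => v) 0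
      = (cells.map Prod.snd).foldl max 0 :=
    pv_maxD_eq _ ⟨p.2, List.mem_map_of_mem hp, hppos⟩
  rw [hm]
  have hdict : PySem.Dict.counter ((cells.map Prod.snd).flatMap (fun v => PySem.List.pyRange 1 (v + 1) 1))
      = List.foldl (fun (d : PySem.Dict Int Int) i =>
          d.insert i ((List.map (fun _ => (1 : Int)) ((cells.map Prod.snd).filter (fun v => i ≤ v))).sum))
          PySem.Dict.empty (PySem.List.pyRange 1 ((cells.map Prod.snd).foldl max 0 + 1) 1) := by
    apply PySem.Dict.ext
    rw [PySem.Dict.items_counter, pv_ofList_flat, pv_items_B]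
    apply List.map_congr_left
    intro i hi
    have hi1 : 1 ≤ i := (PySem.List.mem_pyRange_one.1 hi).1
    have := pv_count_flat (cells.map Prod.snd) i hi1
    rw [this, PySem.List.sum_map_const_int, List.countP_eq_length_filter]
    simp
  rw [hdict]
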